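-- pv_equiv track=rewrite | github.com/Rduanchen/NTUTProgramingCourse | 029TextEditor.py | iakey
-- ===== SOURCE A (Python) =====
-- def iakey(key, word, document:list): # add word after key
--     for rowID in range(len(document)):
--         newArr = document[rowID].copy()
--         index = 0
--         for colID in range(len(document[rowID])):
--             thatWord = newArr[index]
--             if thatWord == key:
--                 newArr.insert(index+1, word)
--                 index += 1
--             index += 1
--         document[rowID] = newArr
--     return document
-- ===== SOURCE B (Python) =====
-- def iakey(key, word, document: list):  # add word after key
--     # Single-pass rebuild per row: emit each element, then word whenever element == key.
--     # Note: like A, this rebinds each row of `document` in place (same observable mutation).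
--     for rowID, row in enumerate(document):
--         document[rowID] = [x for e in row for x in ((e, word) if e == key else (e,))]
--     return document
-- ===== Notes on version B (the rewrite author's own statement) =====
-- stated objective: simpler
-- what changed: Replaces the index-tracked copy-and-list.insert loop by a single-pass flat-comprehension rebuild of each row (emit element, then word when element == key).
import Mathlib
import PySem

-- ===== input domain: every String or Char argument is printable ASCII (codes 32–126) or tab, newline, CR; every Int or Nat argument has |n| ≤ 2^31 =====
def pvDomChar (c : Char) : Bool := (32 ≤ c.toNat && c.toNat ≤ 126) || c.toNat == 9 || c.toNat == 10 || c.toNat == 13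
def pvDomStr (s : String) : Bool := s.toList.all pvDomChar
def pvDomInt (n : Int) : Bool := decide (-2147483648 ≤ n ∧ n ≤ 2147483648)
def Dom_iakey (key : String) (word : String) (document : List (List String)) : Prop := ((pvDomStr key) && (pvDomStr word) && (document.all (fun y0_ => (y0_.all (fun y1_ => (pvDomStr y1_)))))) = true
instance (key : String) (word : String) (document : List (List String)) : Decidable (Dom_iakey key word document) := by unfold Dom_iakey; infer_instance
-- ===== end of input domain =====

-- B replaces A's index-tracked copy-and-list.insert inner loop by a single-pass flat rebuild
-- (element, then word when element == key); objective: simpler. Both A and B rebind each row of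
-- `document` in place in Python; the equivalence proved here is about the return value.

-- ===== PORT A =====
-- one step of A's inner loop: read newArr[index]; if == key, insert word at index+1 and bump index twice, else once
def iakeyStep (key : String) (word : String) (st : List String × Int) (_colID : Int) : List String × Int :=
  match PySem.List.pyGet? st.1 st.2 with
  | none => st      -- IndexError in Python; unreachable (index always stays in range)
  | some thatWord =>
    if thatWord == key then (PySem.List.insert st.1 (st.2 + 1) word, st.2 + 1 + 1)
    else (st.1, st.2 + 1)

-- A's body for one row: newArr = row.copy(); index = 0; for colID in range(len(row)): …
def iakeyRowA (key : String) (word : String) (row : List String) : List String :=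
  ((PySem.List.pyRange 0 (row.length : Int) 1).foldl (iakeyStep key word) (row, 0)).1

-- outer loop: document[rowID] = newArr for each rowID — rows are independent, so a map over rows
def iakey (key : String) (word : String) (document : List (List String)) : List (List String) :=
  document.map (iakeyRowA key word)

-- ===== PORT B =====
def iakey_alt (key : String) (word : String) (document : List (List String)) : List (List String) :=
  document.map (fun row => row.flatMap (fun e => if e == key then [e, word] else [e]))

-- ===== PRECONDITION & SPEC =====
def Spec_iakey (key : String) (word : String) (document : List (List String)) (out : List (List String)) : Prop := out = iakey_alt key word document
instance (key : String) (word : String) (document : List (List String)) (out : List (List String)) : Decidable (Spec_iakey key word document out) := by unfold Spec_iakey; infer_instance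

-- ===== CLAIM (what is proved, stated in full; the proofs are below) =====
def Claim_equal_iakey : Prop := ∀ (key : String) (word : String) (document : List (List String)), Dom_iakey key word document → Spec_iakey key word document (iakey key word document)

-- ===== LEMMAS AND PROOFS =====

-- Loop invariant for A's inner loop: with `pre` the already-produced output (the flat rebuild of the
-- processed prefix) and `index = pre.length`, running the loop once per remaining element yields the
-- flat rebuild of the whole row.
theorem iakey_loop_inv (key word : String) :
    ∀ (todo pre : List String) (L : List Int), L.length = todo.length →
      L.foldl (iakeyStep key word) (pre ++ todo, (pre.length : Int)) =
        (pre ++ todo.flatMap (fun e => if e == key then [e, word] else [e]),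
         ((pre ++ todo.flatMap (fun e => if e == key then [e, word] else [e])).length : Int)) := by
  intro todo
  induction todo with
  | nil =>
    intro pre L hL
    simp at hL
    subst hL
    simp
  | cons x rest ih =>
    intro pre L hL
    cases L with
    | nil => simp at hL
    | cons j L' =>
      simp only [List.length_cons, Nat.succ.injEq] at hL
      simp only [List.foldl_cons]
      have hstep : iakeyStep key word (pre ++ x :: rest, (pre.length : Int)) j =
          ((pre ++ (if x == key then [x, word] else [x])) ++ rest,
           ((pre ++ (if x == key then [x, word] else [x])).length : Int)) := by
        unfold iakeyStep
        rw [PySem.List.pyGet?_append_length]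
        by_cases hx : x == key
        · simp only [hx, if_true]
          have hp : ((pre.length : Int) + 1) = ((pre.length + 1 : Nat) : Int) := by push_cast; ring
          rw [hp, PySem.List.insert_natCast _ _ _ (by simp)]
          have hassoc : pre ++ x :: rest = (pre ++ [x]) ++ rest := by simp
          have ht : (pre ++ x :: rest).take (pre.length + 1) = pre ++ [x] := by
            rw [hassoc]; exact List.take_left' (by simp)
          have hd : (pre ++ x :: rest).drop (pre.length + 1) = rest := by
            rw [hassoc]; exact List.drop_left' (by simp)
          rw [ht, hd]
          simp
          ring
        · simp only [hx]
          simp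
      rw [hstep]
      have := ih (pre ++ (if x == key then [x, word] else [x])) L' hL
      simp only [List.append_assoc] at this ⊢
      exact this

-- A's per-row loop computes the flat rebuild.
theorem iakeyRowA_eq (key word : String) (row : List String) :
    iakeyRowA key word row = row.flatMap (fun e => if e == key then [e, word] else [e]) := by
  unfold iakeyRowA
  have hlen : (PySem.List.pyRange 0 (row.length : Int) 1).length = row.length := by
    rw [PySem.List.length_pyRange_one]; simp
  have h := iakey_loop_inv key word row [] (PySem.List.pyRange 0 (row.length : Int) 1) (by simpa using hlen)
  have h1 := congrArg Prod.fst h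
  simp only [List.nil_append, List.length_nil, Nat.cast_zero] at h1
  exact h1

-- ===== VERDICT (by name: the statement is the Claim_ definition above) =====
theorem iakey_spec : Claim_equal_iakey := by
  intro key word document _
  unfold Spec_iakey iakey iakey_alt
  exact List.map_congr_left (fun row _ => iakeyRowA_eq key word row)
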